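-- pv_equiv track=rewrite | github.com/hifzatahir568/Scrapper-Project- | scrapper.py | extract_urls_from_srcset
-- ===== SOURCE A (Python) =====
-- from typing import List, Optional, Dict, Tuple, Any
--
-- def extract_urls_from_srcset(srcset: str) -> List[str]:
--     out = []
--     if not srcset:
--         return out
--     parts = [p.strip() for p in srcset.split(",")]
--     for p in parts:
--         if not p:
--             continue
--         url = p.split()[0].strip()
--         if url:
--             out.append(url)
--     return out
-- ===== SOURCE B (Python) =====
-- def extract_urls_from_srcset(srcset):
--     # single left-to-right character scan (state machine) instead of split/strip/split
--     out = []
--     tok = []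
--     taken = False
--     for ch in (srcset or "") + ",":
--         if ch == ",":
--             if not taken and tok:
--                 out.append("".join(tok))
--             tok = []
--             taken = False
--         elif ch.isspace():
--             if tok and not taken:
--                 out.append("".join(tok))
--                 taken = True
--             tok = []
--         else:
--             tok.append(ch)
--     return out
-- ===== Notes on version B (the rewrite author's own statement) =====
-- stated objective: alternative
-- what changed: B replaces A's split-on-comma / strip / per-segment split() passes by a single left-to-right character scan with a small state machine (current token, first-token-taken flag) that emits the first whitespace-delimited token of each comma segment.
import Mathlib
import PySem

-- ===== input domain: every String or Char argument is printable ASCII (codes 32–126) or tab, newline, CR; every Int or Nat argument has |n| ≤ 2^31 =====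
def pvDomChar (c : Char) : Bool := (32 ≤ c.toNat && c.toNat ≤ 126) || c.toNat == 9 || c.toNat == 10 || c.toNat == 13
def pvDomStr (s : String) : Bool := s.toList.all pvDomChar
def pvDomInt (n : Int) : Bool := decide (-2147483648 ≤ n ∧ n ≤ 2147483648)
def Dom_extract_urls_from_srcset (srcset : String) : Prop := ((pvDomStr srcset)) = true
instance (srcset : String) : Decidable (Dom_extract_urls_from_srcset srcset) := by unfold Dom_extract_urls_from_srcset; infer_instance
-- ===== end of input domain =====

-- B replaces A's split/strip/split-per-segment passes by one left-to-right character scan (state machine); same result, alternative structure.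

-- ===== PORT A =====
-- loop body of A's `for p in parts` (helper so the lemmas can name it)
def pvAStep (out : List String) (p : List Char) : List String :=
  if p = [] then out
  else
    match PySem.List.pyGet? (PySem.Chars.split₀ p) 0 with
    | none => out  -- unreachable: p is nonempty and stripped, so p.split() is nonempty
    | some w =>
      let url := PySem.Chars.strip w
      if url = [] then out else out ++ [String.ofList url]

def extract_urls_from_srcset (srcset : String) : List String :=
  let out : List String := []
  if srcset.toList = [] then out
  else
    ((PySem.Chars.splitOn srcset.toList [',']).map PySem.Chars.strip).foldl pvAStep out

-- ===== PORT B =====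
def pvAltGo : List Char → List Char → Bool → List String → List String
  | [], _, _, out => out
  | c :: rest, tok, taken, out =>
    if c = ',' then
      pvAltGo rest [] false (if !taken && !tok.isEmpty then out ++ [String.ofList tok] else out)
    else if PySem.Chars.isspace c then
      (if !tok.isEmpty && !taken then pvAltGo rest [] true (out ++ [String.ofList tok])
       else pvAltGo rest [] taken out)
    else pvAltGo rest (tok ++ [c]) taken out

def extract_urls_from_srcset_alt (srcset : String) : List String :=
  pvAltGo (srcset.toList ++ [',']) [] false []

-- ===== PRECONDITION & SPEC =====
def Spec_extract_urls_from_srcset (srcset : String) (out : List String) : Prop := out = extract_urls_from_srcset_alt srcset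
instance (srcset : String) (out : List String) : Decidable (Spec_extract_urls_from_srcset srcset out) := by unfold Spec_extract_urls_from_srcset; infer_instance

-- ===== CLAIM (what is proved, stated in full; the proofs are below) =====
def Claim_equal_extract_urls_from_srcset : Prop := ∀ (srcset : String), Dom_extract_urls_from_srcset srcset → Spec_extract_urls_from_srcset srcset (extract_urls_from_srcset srcset)

-- ===== LEMMAS AND PROOFS =====

-- "not whitespace", the token predicate
def pvNS (c : Char) : Bool := !PySem.Chars.isspace c

-- the comma segmentation of a string, as a simple structural recursion
def pvSegs : List Char → List (List Char)
  | [] => [[]]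
  | c :: r =>
    if c = ',' then [] :: pvSegs r
    else match pvSegs r with
      | [] => [[c]]
      | h :: t => (c :: h) :: t

def pvConsHead (x : List Char) : List (List Char) → List (List Char)
  | [] => [x]
  | h :: t => (x ++ h) :: t

-- the contribution of one comma segment to the output
def pvFirstTok (s : List Char) : List String :=
  let t := (s.dropWhile PySem.Chars.isspace).takeWhile pvNS
  if t = [] then [] else [String.ofList t]

lemma pvSegs_ne_nil (cs : List Char) : pvSegs cs ≠ [] := by
  cases cs with
  | nil => simp [pvSegs]
  | cons c r =>
    simp only [pvSegs]
    split
    · simp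
    · cases pvSegs r <;> simp

lemma pvSegs_cons (cs : List Char) : ∃ h t, pvSegs cs = h :: t := by
  cases hs : pvSegs cs with
  | nil => exact absurd hs (pvSegs_ne_nil cs)
  | cons a b => exact ⟨a, b, rfl⟩

lemma pvSplitOn_go_segs : ∀ (fuel : Nat) (l cur : List Char) (acc : List (List Char)),
    l.length < fuel →
    PySem.Chars.splitOn.go [','] fuel l cur acc = acc.reverse ++ pvConsHead cur.reverse (pvSegs l) := by
  intro fuel
  induction fuel with
  | zero => intro l cur acc h; omega
  | succ fuel ih =>
    intro l cur acc h
    cases l with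
    | nil =>
      rw [PySem.Chars.splitOn.go]
      · simp [pvSegs, pvConsHead]
      · omega
    | cons c r =>
      rw [PySem.Chars.splitOn.go]
      by_cases hc : c = ','
      · subst hc
        simp only [List.isPrefixOf, BEq.rfl, Bool.true_and, if_pos]
        rw [ih _ _ _ (by simp at h ⊢; omega)]
        obtain ⟨h', t', hseg⟩ := pvSegs_cons r
        simp [pvSegs, hseg, pvConsHead]
      · have : [','].isPrefixOf (c :: r) = false := by
          simp [List.isPrefixOf]; exact fun hh => absurd hh.symm hc
        rw [this]
        simp only [Bool.false_eq_true, if_false]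
        rw [ih _ _ _ (by simp at h ⊢; omega)]
        obtain ⟨h', t', hseg⟩ := pvSegs_cons r
        simp [pvSegs, hseg, pvConsHead, hc]

lemma pvSplitOn_eq_segs (cs : List Char) : PySem.Chars.splitOn cs [','] = pvSegs cs := by
  unfold PySem.Chars.splitOn
  rw [pvSplitOn_go_segs _ _ _ _ (by omega)]
  obtain ⟨h', t', hseg⟩ := pvSegs_cons cs
  simp [hseg, pvConsHead]

lemma pvSplit₀_go_acc : ∀ (x cur : List Char) (acc : List (List Char)),
    PySem.Chars.split₀.go x cur acc = acc.reverse ++ PySem.Chars.split₀.go x cur [] := by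
  intro x
  induction x with
  | nil =>
    intro cur acc
    rw [PySem.Chars.split₀.go, PySem.Chars.split₀.go]
    by_cases hc : cur.isEmpty <;> simp [hc]
  | cons c r ih =>
    intro cur acc
    rw [PySem.Chars.split₀.go]
    conv_rhs => rw [PySem.Chars.split₀.go]
    by_cases hs : PySem.Chars.isspace c <;> by_cases hc : cur.isEmpty <;>
      simp only [hs, hc, if_true, if_false, Bool.false_eq_true] <;>
      rw [ih] <;> conv_rhs => rw [ih]
    all_goals simp

lemma pvSplit₀_go_first : ∀ (x cur : List Char), cur ≠ [] →
    PySem.Chars.split₀.go x cur [] =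
      (cur.reverse ++ x.takeWhile pvNS) :: PySem.Chars.split₀ (x.dropWhile pvNS) := by
  intro x
  induction x with
  | nil =>
    intro cur hcur
    rw [PySem.Chars.split₀.go]
    simp [List.isEmpty_iff, hcur, PySem.Chars.split₀, PySem.Chars.split₀.go]
  | cons c r ih =>
    intro cur hcur
    rw [PySem.Chars.split₀.go]
    by_cases hs : PySem.Chars.isspace c
    · simp only [hs, if_true, List.isEmpty_iff, hcur, if_false]
      rw [pvSplit₀_go_acc]
      have hdw : (c :: r).dropWhile pvNS = c :: r := by simp [List.dropWhile_cons, pvNS, hs]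
      rw [hdw]
      simp only [List.takeWhile_cons, pvNS, hs, Bool.not_true, Bool.false_eq_true, if_false,
        List.append_nil, PySem.Chars.split₀]
      conv_rhs => rw [PySem.Chars.split₀.go]
      simp [hs]
    · simp only [hs, Bool.false_eq_true, if_false]
      rw [ih (c :: cur) (by simp)]
      simp [List.takeWhile_cons, List.dropWhile_cons, pvNS, hs]

lemma pvSplit₀_pos (c : Char) (r : List Char) (h : PySem.Chars.isspace c = false) :
    PySem.Chars.split₀ (c :: r) =
      ((c :: r).takeWhile pvNS) :: PySem.Chars.split₀ ((c :: r).dropWhile pvNS) := by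
  unfold PySem.Chars.split₀
  rw [PySem.Chars.split₀.go]
  simp only [h, Bool.false_eq_true, if_false]
  rw [pvSplit₀_go_first r [c] (by simp)]
  simp [List.takeWhile_cons, List.dropWhile_cons, pvNS, h, PySem.Chars.split₀]

lemma pvRstrip_decomp (d : List Char) :
    ∃ sp, d = PySem.Chars.rstrip d ++ sp ∧ ∀ c ∈ sp, PySem.Chars.isspace c = true := by
  refine ⟨(d.reverse.takeWhile PySem.Chars.isspace).reverse, ?_, ?_⟩
  · unfold PySem.Chars.rstrip
    conv_lhs => rw [← List.reverse_reverse d,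
      ← List.takeWhile_append_dropWhile (p := PySem.Chars.isspace) (l := d.reverse)]
    rw [List.reverse_append]
  · intro c hc
    rw [List.mem_reverse] at hc
    exact List.mem_takeWhile_imp hc

lemma pvStrip_eq_nil_iff (p : List Char) :
    PySem.Chars.strip p = [] ↔ p.dropWhile PySem.Chars.isspace = [] := by
  unfold PySem.Chars.strip PySem.Chars.rstrip PySem.Chars.lstrip
  constructor
  · intro h
    have h2 : ∀ c ∈ (p.dropWhile PySem.Chars.isspace).reverse, PySem.Chars.isspace c = true := by
      rw [← List.dropWhile_eq_nil_iff]
      simpa using h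
    cases hd : p.dropWhile PySem.Chars.isspace with
    | nil => rfl
    | cons c r =>
      have hc : PySem.Chars.isspace c = false := by
        have := List.head_dropWhile_not PySem.Chars.isspace (l := p)
        simp [hd] at this
        simpa using this
      have : PySem.Chars.isspace c = true := h2 c (by simp [hd])
      simp [hc] at this
  · intro h; simp [h]

lemma pvTakeWhile_rstrip (d : List Char) :
    (PySem.Chars.rstrip d).takeWhile pvNS = d.takeWhile pvNS := by
  obtain ⟨sp, hd, hsp⟩ := pvRstrip_decomp d
  conv_rhs => rw [hd]
  rw [List.takeWhile_append]
  split
  · next hlen =>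
    have he : (PySem.Chars.rstrip d).takeWhile pvNS = PySem.Chars.rstrip d :=
      List.IsPrefix.eq_of_length (List.takeWhile_prefix _) hlen
    rw [he]
    cases hs : sp with
    | nil => simp
    | cons c r =>
      have : pvNS c = false := by
        have := hsp c (by simp [hs]); simp [pvNS, this]
      simp [List.takeWhile_cons, this]
  · rfl

lemma pvStrip_all_ns (t : List Char) (h : ∀ c ∈ t, pvNS c = true) :
    PySem.Chars.strip t = t := by
  unfold PySem.Chars.strip PySem.Chars.lstrip PySem.Chars.rstrip
  have h1 : t.dropWhile PySem.Chars.isspace = t := by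
    rw [List.dropWhile_eq_self_iff]
    cases t with
    | nil => simp
    | cons c r => have := h c (by simp); simp_all [pvNS]
  rw [h1]
  have h2 : t.reverse.dropWhile PySem.Chars.isspace = t.reverse := by
    rw [List.dropWhile_eq_self_iff]
    cases ht : t.reverse with
    | nil => simp
    | cons c r =>
      have hc : c ∈ t := by rw [← List.mem_reverse, ht]; simp
      have := h c hc; simp_all [pvNS]
  rw [h2]; simp

lemma pvAStep_strip (out : List String) (s : List Char) :
    pvAStep out (PySem.Chars.strip s) = out ++ pvFirstTok s := by
  cases hd : s.dropWhile PySem.Chars.isspace with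
  | nil =>
    have h0 : PySem.Chars.strip s = [] := (pvStrip_eq_nil_iff s).2 hd
    simp [pvAStep, h0, pvFirstTok, hd]
  | cons c r =>
    have hc : PySem.Chars.isspace c = false := by
      have := List.head_dropWhile_not PySem.Chars.isspace (l := s)
      simp [hd] at this
      simpa using this
    have hne : PySem.Chars.strip s ≠ [] := by
      rw [Ne, pvStrip_eq_nil_iff, hd]; simp
    have hstrip : PySem.Chars.strip s = PySem.Chars.rstrip (c :: r) := by
      unfold PySem.Chars.strip PySem.Chars.lstrip
      rw [hd]
    obtain ⟨c', r', hcr⟩ : ∃ c' r', PySem.Chars.rstrip (c :: r) = c' :: r' := by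
      rw [← hstrip]
      cases hx : PySem.Chars.strip s with
      | nil => exact absurd hx hne
      | cons a b => exact ⟨a, b, rfl⟩
    have hc' : c' = c := by
      obtain ⟨sp, hdec, _⟩ := pvRstrip_decomp (c :: r)
      rw [hcr] at hdec
      exact (List.cons.injEq .. ▸ hdec).1.symm
    have hsplit : PySem.Chars.split₀ (PySem.Chars.strip s) =
        ((c :: r).takeWhile pvNS) :: PySem.Chars.split₀ ((c' :: r').dropWhile pvNS) := by
      rw [hstrip, hcr, pvSplit₀_pos c' r' (hc' ▸ hc)]
      rw [← hcr, pvTakeWhile_rstrip]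
    have htw : (c :: r).takeWhile pvNS = c :: r.takeWhile pvNS := by
      simp [List.takeWhile_cons, pvNS, hc]
    have hmem : ∀ x ∈ (c :: r).takeWhile pvNS, pvNS x = true :=
      fun x hx => List.mem_takeWhile_imp hx
    have hget : PySem.List.pyGet?
        (((c :: r).takeWhile pvNS) :: PySem.Chars.split₀ ((c' :: r').dropWhile pvNS)) 0 =
        some ((c :: r).takeWhile pvNS) := by
      simp [PySem.List.pyGet?, PySem.List.pyIdx?]
    unfold pvAStep
    have hstr := pvStrip_all_ns _ hmem
    rw [htw] at hstr
    rw [if_neg hne, hsplit, hget]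
    simp [hstr, htw, pvFirstTok, hd]

lemma pvFoldA (l : List (List Char)) (out : List String) :
    (l.map PySem.Chars.strip).foldl pvAStep out = out ++ l.flatMap pvFirstTok := by
  induction l generalizing out with
  | nil => simp
  | cons h t ih =>
    simp only [List.map_cons, List.foldl_cons, List.flatMap_cons]
    rw [pvAStep_strip, ih]
    simp

lemma pvB_main : ∀ cs : List Char,
    (∀ tok out, pvAltGo (cs ++ [',']) tok true out = out ++ (pvSegs cs).tail.flatMap pvFirstTok) ∧
    (∀ tok out, pvAltGo (cs ++ [',']) tok false out =
      out ++ (if tok = [] then pvFirstTok (pvSegs cs).headI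
              else [String.ofList (tok ++ (pvSegs cs).headI.takeWhile pvNS)]) ++
        (pvSegs cs).tail.flatMap pvFirstTok) := by
  intro cs
  induction cs with
  | nil =>
    constructor
    · intro tok out
      simp [pvAltGo, pvSegs]
    · intro tok out
      by_cases htok : tok = [] <;>
        simp [pvAltGo, pvSegs, pvFirstTok, htok]
  | cons c r ih =>
    obtain ⟨ih1, ih2⟩ := ih
    obtain ⟨h', t', hseg⟩ := pvSegs_cons r
    by_cases hc : c = ','
    · subst hc
      constructor
      · intro tok out
        simp only [List.cons_append]
        rw [pvAltGo]
        simp only [reduceIte, Bool.not_true, Bool.false_and, Bool.false_eq_true]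
        rw [ih2 [] out]
        simp [pvSegs, hseg]
      · intro tok out
        simp only [List.cons_append]
        rw [pvAltGo]
        simp only [reduceIte, Bool.not_false, Bool.true_and]
        rw [ih2 []]
        by_cases htok : tok = [] <;>
          [skip; have hE : tok.isEmpty = false := by simp [htok]] <;>
          simp [pvSegs, hseg, htok, pvFirstTok]
    · by_cases hs : PySem.Chars.isspace c
      · constructor
        · intro tok out
          simp only [List.cons_append]
          rw [pvAltGo]
          simp only [if_neg hc, hs, if_true, Bool.not_true, Bool.and_false, Bool.false_eq_true,
            if_false]
          rw [ih1 [] out]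
          simp [pvSegs, hseg, hc]
        · intro tok out
          simp only [List.cons_append]
          rw [pvAltGo]
          simp only [if_neg hc, hs, if_true, Bool.not_false, Bool.and_true]
          by_cases htok : tok = []
          · subst htok
            simp only [List.isEmpty_nil, Bool.not_true, Bool.false_eq_true, if_false]
            rw [ih2 [] out]
            simp [pvSegs, hseg, hc, pvFirstTok, List.dropWhile_cons, hs]
          · have hE : tok.isEmpty = false := by simp [htok]
            simp only [hE, Bool.not_false, if_true]
            rw [ih1 []]
            simp [pvSegs, hseg, hc, htok, List.takeWhile_cons, pvNS, hs]
      · constructor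
        · intro tok out
          simp only [List.cons_append]
          rw [pvAltGo]
          simp only [if_neg hc, hs, Bool.false_eq_true, if_false]
          rw [ih1]
          simp [pvSegs, hseg, hc]
        · intro tok out
          simp only [List.cons_append]
          rw [pvAltGo]
          simp only [if_neg hc, hs, Bool.false_eq_true, if_false]
          rw [ih2 (tok ++ [c])]
          by_cases htok : tok = [] <;>
            simp [pvSegs, hseg, hc, htok, pvFirstTok, List.takeWhile_cons, List.dropWhile_cons,
              pvNS, hs]

lemma pvA_eq (s : String) :
    extract_urls_from_srcset s = (pvSegs s.toList).flatMap pvFirstTok := by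
  unfold extract_urls_from_srcset
  by_cases hnil : s.toList = []
  · simp [hnil, pvSegs, pvFirstTok]
  · simp only [if_neg hnil]
    rw [pvSplitOn_eq_segs, pvFoldA]
    simp

lemma pvB_eq (s : String) :
    extract_urls_from_srcset_alt s = (pvSegs s.toList).flatMap pvFirstTok := by
  unfold extract_urls_from_srcset_alt
  rw [(pvB_main s.toList).2 [] []]
  obtain ⟨h', t', hseg⟩ := pvSegs_cons s.toList
  simp [hseg]


-- ===== VERDICT (by name: the statement is the Claim_ definition above) =====
theorem extract_urls_from_srcset_spec : Claim_equal_extract_urls_from_srcset := by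
  intro s _
  unfold Spec_extract_urls_from_srcset
  rw [pvA_eq, pvB_eq]
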